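-- pv_equiv track=rewrite | github.com/BeltranBot/codewars-solutions | 5kyu/scramble/script.py | scramble2
-- ===== SOURCE A (Python) =====
-- def scramble2(s1, s2):
--
--     def hashString(s):
--         obj = {}
--
--         for i in s:
--             if i in obj:
--                 obj[i] += 1
--             else:
--                 obj[i] = 1
--
--         return obj
--
--     obj1 = hashString(s1)
--     obj2 = hashString(s2)
--
--     for i in obj2:
--         if i in obj1 and obj1[i] >= obj2[i]:
--             continue
--
--         return False
--
--     return True
-- ===== SOURCE B (Python) =====
-- def scramble2(s1, s2):
--     avail = {}
--     for ch in s1: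
--         avail[ch] = avail.get(ch, 0) + 1
--     for ch in s2:
--         n = avail.get(ch, 0)
--         if n <= 0:
--             return False
--         avail[ch] = n - 1
--     return True
-- ===== Notes on version B (the rewrite author's own statement) =====
-- stated objective: simpler
-- what changed: B builds only one frequency dict (from s1) and consumes it in a single scan over s2 with early exit, instead of building a second frequency table for s2 and then comparing the two tables key by key.
import Mathlib
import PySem

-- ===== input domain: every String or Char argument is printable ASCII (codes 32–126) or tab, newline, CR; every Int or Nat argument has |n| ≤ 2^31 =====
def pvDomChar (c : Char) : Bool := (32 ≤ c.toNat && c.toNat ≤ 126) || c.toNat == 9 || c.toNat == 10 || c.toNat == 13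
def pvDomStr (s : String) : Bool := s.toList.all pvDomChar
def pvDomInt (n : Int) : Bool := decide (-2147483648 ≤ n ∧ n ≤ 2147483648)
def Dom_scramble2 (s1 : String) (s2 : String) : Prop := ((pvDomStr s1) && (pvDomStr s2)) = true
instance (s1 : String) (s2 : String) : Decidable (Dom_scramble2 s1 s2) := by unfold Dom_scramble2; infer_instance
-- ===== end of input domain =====

-- B builds one frequency dict from s1 and consumes it in a single scan over s2 (early exit),
-- instead of building a second frequency table for s2 and comparing the two tables (simpler decomposition).


-- ===== PORT A =====
-- hashString: the inner helper of A, counting occurrences with an if-in/else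
def hashStringA (s : String) : PySem.Dict Char Int :=
  s.toList.foldl
    (fun obj i => if obj.contains i then obj.insert i (obj.getD i 0 + 1) else obj.insert i 1)
    PySem.Dict.empty

-- A's final loop over the keys of obj2 ('for i in obj2'); obj2[i] is getD (key present: we iterate obj2's keys)
def loopA : List Char → PySem.Dict Char Int → PySem.Dict Char Int → Bool
  | [], _, _ => true
  | i :: rest, obj1, obj2 =>
    if obj1.contains i && decide (obj2.getD i 0 ≤ obj1.getD i 0) then loopA rest obj1 obj2
    else false

def scramble2 (s1 : String) (s2 : String) : Bool :=
  let obj1 := hashStringA s1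
  let obj2 := hashStringA s2
  loopA obj2.keys obj1 obj2

-- ===== PORT B =====
def buildAvail (s : String) : PySem.Dict Char Int :=
  s.toList.foldl (fun d ch => d.insert ch (d.getD ch 0 + 1)) PySem.Dict.empty

def consumeB : List Char → PySem.Dict Char Int → Bool
  | [], _ => true
  | ch :: rest, avail =>
    let n := avail.getD ch 0
    if n ≤ 0 then false else consumeB rest (avail.insert ch (n - 1))

def scramble2_alt (s1 : String) (s2 : String) : Bool :=
  consumeB s2.toList (buildAvail s1)

-- ===== PRECONDITION & SPEC =====
def Spec_scramble2 (s1 : String) (s2 : String) (out : Bool) : Prop := out = scramble2_alt s1 s2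
instance (s1 : String) (s2 : String) (out : Bool) : Decidable (Spec_scramble2 s1 s2 out) := by unfold Spec_scramble2; infer_instance

-- ===== CLAIM (what is proved, stated in full; the proofs are below) =====
def Claim_equal_scramble2 : Prop := ∀ (s1 : String) (s2 : String), Dom_scramble2 s1 s2 → Spec_scramble2 s1 s2 (scramble2 s1 s2)

-- ===== LEMMAS AND PROOFS =====

lemma consumeB_cons (ch : Char) (rest : List Char) (d : PySem.Dict Char Int) :
    consumeB (ch :: rest) d =
      if d.getD ch 0 ≤ 0 then false else consumeB rest (d.insert ch (d.getD ch 0 - 1)) := rfl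

-- A's if-in/else counting step is the plain insert-getD+1 step (when the key is absent, getD is 0)
lemma hashStringA_eq_counter (s : String) : hashStringA s = PySem.Dict.counter s.toList := by
  have hstep : (fun (obj : PySem.Dict Char Int) i =>
      if obj.contains i then obj.insert i (obj.getD i 0 + 1) else obj.insert i 1)
      = (fun (d : PySem.Dict Char Int) ch => d.insert ch (d.getD ch 0 + 1)) := by
    funext d x
    by_cases h : d.contains x
    · simp [h]
    · have h0 : d.getD x 0 = 0 :=
        PySem.Dict.getD_of_not_contains d 0 (by simpa using h)
      simp [h, h0]
  unfold hashStringA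
  rw [hstep, PySem.Dict.foldl_insert_getD_add_one_eq_counter]

lemma getD_buildAvail (s : String) (c : Char) :
    (buildAvail s).getD c 0 = (s.toList.count c : Int) := by
  unfold buildAvail
  rw [PySem.Dict.foldl_insert_getD_add_one_eq_counter]
  exact PySem.Dict.getD_counter _ _

lemma loopA_iff (ks : List Char) (o1 o2 : PySem.Dict Char Int) :
    loopA ks o1 o2 = true ↔ ∀ c ∈ ks, (o1.contains c = true ∧ o2.getD c 0 ≤ o1.getD c 0) := by
  induction ks with
  | nil => simp [loopA]
  | cons i rest ih =>
    by_cases h : o1.contains i = true ∧ o2.getD i 0 ≤ o1.getD i 0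
    · simp [loopA, h.1, h.2, ih]
    · have hcond : (o1.contains i && decide (o2.getD i 0 ≤ o1.getD i 0)) = false := by
        rcases Decidable.not_and_iff_not_or_not.mp h with h1 | h2
        · simp [Bool.eq_false_iff.mpr h1]
        · simp [decide_eq_false h2]
      simp only [loopA, hcond, Bool.false_eq_true, if_false, false_iff]
      intro hall
      exact h ⟨(hall i (by simp)).1, (hall i (by simp)).2⟩

lemma consumeB_iff (l : List Char) (d : PySem.Dict Char Int) :
    consumeB l d = true ↔ ∀ c ∈ l, (l.count c : Int) ≤ d.getD c 0 := by
  induction l generalizing d with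
  | nil => simp [consumeB]
  | cons ch rest ih =>
    rw [consumeB_cons]
    by_cases hpos : d.getD ch 0 ≤ 0
    · rw [if_pos hpos]
      simp only [Bool.false_eq_true, false_iff]
      intro hall
      have h1 : ((ch :: rest).count ch : Int) ≤ d.getD ch 0 := hall ch (by simp)
      have h2 : 1 ≤ (ch :: rest).count ch := List.one_le_count_iff.mpr (by simp)
      have h3 : (1 : Int) ≤ (ch :: rest).count ch := by exact_mod_cast h2
      omega
    · have hgt : 0 < d.getD ch 0 := lt_of_not_ge hpos
      rw [if_neg hpos, ih]
      constructor
      · intro hall x hx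
        by_cases hxch : x = ch
        · subst hxch
          by_cases hmem : x ∈ rest
          · have h1 := hall x hmem
            rw [PySem.Dict.getD_insert, if_pos rfl] at h1
            have h2 : ((x :: rest).count x : Int) = (rest.count x : Int) + 1 := by
              simp [List.count_cons]
            omega
          · have h0 : rest.count x = 0 := List.count_eq_zero.mpr hmem
            have h2 : ((x :: rest).count x : Int) = 1 := by
              simp [List.count_cons, h0]
            omega
        · have hmem : x ∈ rest := by
            rcases List.mem_cons.mp hx with h' | h'
            · exact absurd h' hxch
            · exact h'
          have h1 := hall x hmem
          rw [PySem.Dict.getD_insert, if_neg hxch] at h1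
          have h2 : ((ch :: rest).count x : Int) = (rest.count x : Int) := by
            simp [List.count_cons, Ne.symm hxch]
          omega
      · intro hall x hx
        rw [PySem.Dict.getD_insert]
        by_cases hxch : x = ch
        · subst hxch
          rw [if_pos rfl]
          have h1 := hall x (by simp)
          have h2 : ((x :: rest).count x : Int) = (rest.count x : Int) + 1 := by
            simp [List.count_cons]
          omega
        · rw [if_neg hxch]
          have h1 := hall x (List.mem_cons_of_mem _ hx)
          have h2 : ((ch :: rest).count x : Int) = (rest.count x : Int) := by
            simp [List.count_cons, Ne.symm hxch]
          omega

-- the common characterisation: every letter of s2 occurs at least as often in s1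
lemma scramble2_iff (s1 s2 : String) :
    scramble2 s1 s2 = true ↔
      ∀ c ∈ s2.toList, (s2.toList.count c : Int) ≤ (s1.toList.count c : Int) := by
  unfold scramble2
  rw [loopA_iff, hashStringA_eq_counter, hashStringA_eq_counter, PySem.Dict.keys_counter]
  constructor
  · intro h c hc
    have h1 := h c ((PySem.Set.mem_ofList _ _).mpr hc)
    rw [PySem.Dict.getD_counter, PySem.Dict.getD_counter] at h1
    exact h1.2
  · intro h c hc
    rw [PySem.Set.mem_ofList] at hc
    have hle := h c hc
    refine ⟨?_, ?_⟩
    · rw [PySem.Dict.contains_counter]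
      have h2 : 1 ≤ s2.toList.count c := List.one_le_count_iff.mpr hc
      have h3 : (1 : Int) ≤ (s1.toList.count c : Int) := by
        have : (1 : Int) ≤ (s2.toList.count c : Int) := by exact_mod_cast h2
        omega
      have h4 : 1 ≤ s1.toList.count c := by exact_mod_cast h3
      exact List.contains_iff_mem.mpr (List.one_le_count_iff.mp h4)
    · rw [PySem.Dict.getD_counter, PySem.Dict.getD_counter]
      exact hle

lemma scramble2_alt_iff (s1 s2 : String) :
    scramble2_alt s1 s2 = true ↔
      ∀ c ∈ s2.toList, (s2.toList.count c : Int) ≤ (s1.toList.count c : Int) := by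
  unfold scramble2_alt
  rw [consumeB_iff]
  simp only [getD_buildAvail]

-- ===== VERDICT (by name: the statement is the Claim_ definition above) =====
theorem scramble2_spec : Claim_equal_scramble2 := by
  intro s1 s2 _
  unfold Spec_scramble2
  have h := (scramble2_iff s1 s2).trans (scramble2_alt_iff s1 s2).symm
  cases hA : scramble2 s1 s2 <;> cases hB : scramble2_alt s1 s2 <;> simp_all
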